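-- pv_equiv track=rewrite | github.com/engrvitalis/BertelsmanProjects | capitalize_it.py | capitalize_it
-- ===== SOURCE A (Python) =====
-- def capitalize_it(string):
--     # Declare state variables.
--     special_char = ['.', ',', '!', '?']
--     result = []
--
--     # Convert string to list.
--     result_list = string.split()
--     # Capitalize the first word.
--     result.append(result_list[0].capitalize())
--
--     # Move through the rest of the list and capitalize as per specification.
--     for elem in result_list[1:]:
--         if result[-1][-1] in special_char:
--             result.append(elem.capitalize()) # Capitalize words followed by special character.
--         elif elem == 'i':
--             result.append(elem.capitalize()) # Capitalize 'i' surrounded by spaces.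
--         else:
--             result.append(elem)
--
--     return ' '.join([str(elem) for elem in result]) # Convert back to string and return.
-- ===== SOURCE B (Python) =====
-- def capitalize_it(string):
--     # Character-level state machine over the whitespace-normalized text:
--     # walk ' '.join(string.split()) once, uppercasing/lowercasing characters of
--     # words that must be capitalized (first word; word after '.', ',', '!', '?';
--     # the standalone word 'i'), instead of capitalizing whole words in a list.
--     text = ' '.join(string.split())
--     out = []
--     cap = True       # does the current word get capitalized?
--     start = True     # are we at the first character of a word?
--     prev = ''        # last non-space character seen (end of previous word)
--     i = 0
--     while i < len(text):
--         c = text[i]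
--         if c == ' ':
--             out.append(' ')
--             next_is_i = text[i + 1] == 'i' and (i + 2 == len(text) or text[i + 2] == ' ')
--             cap = prev in '.,!?' or next_is_i
--             start = True
--         elif cap:
--             out.append(c.upper() if start else c.lower())
--             start = False
--             prev = c
--         else:
--             out.append(c)
--             start = False
--             prev = c
--         i += 1
--     return ''.join(out)
-- ===== Notes on version B (the rewrite author's own statement) =====
-- stated objective: alternative
-- what changed: Replaces A's word-list pass that appends capitalized words to an accumulator and re-reads result[-1][-1] with a character-level state machine: B walks the whitespace-normalized text ' '.join(string.split()) once, carrying (capitalize-this-word, at-word-start, last-char-of-previous-word) flags and upper/lower-casing individual characters, with a two-character lookahead detecting the standalone word 'i'.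
import Mathlib
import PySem

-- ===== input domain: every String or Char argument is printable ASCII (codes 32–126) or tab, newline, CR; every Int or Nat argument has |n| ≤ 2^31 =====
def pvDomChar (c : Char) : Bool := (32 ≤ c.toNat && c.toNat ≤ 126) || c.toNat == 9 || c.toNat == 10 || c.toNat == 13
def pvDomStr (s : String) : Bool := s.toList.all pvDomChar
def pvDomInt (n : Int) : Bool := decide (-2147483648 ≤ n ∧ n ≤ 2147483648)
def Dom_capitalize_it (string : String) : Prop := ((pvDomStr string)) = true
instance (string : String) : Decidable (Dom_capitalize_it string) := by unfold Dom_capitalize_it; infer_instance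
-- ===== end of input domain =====

-- B replaces A's word-list accumulator pass with a one-pass character-level state
-- machine over ' '.join(string.split()); return-value equivalence only.

-- the special-character list shared by both Pythons: '.', ',', '!', '?'
def pvSpecial : List Char := ['.', ',', '!', '?']

-- ===== PORT A =====
-- str.capitalize() on a word (exact on the ASCII domain): upper-case the first
-- character, lower-case the rest
def pvCapWord (w : List Char) : List Char :=
  match w with
  | [] => []
  | c :: cs => PySem.Chars.upperChar c :: cs.map PySem.Chars.lowerChar

-- «w[-1] in special_char» for a word w (false on the empty word, which split() never yields)
def pvLastSpecial (w : List Char) : Bool :=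
  match w.getLast? with
  | some c => pvSpecial.contains c
  | none => false

-- «result[-1][-1] in special_char»: reads the last word of the accumulator
def pvFlagA (res : List (List Char)) : Bool :=
  match res.getLast? with
  | some lastw => pvLastSpecial lastw
  | none => false

def capitalize_it (string : String) : String :=
  let result_list := PySem.Chars.split₀ string.toList
  match result_list with
  | [] => ""  -- result_list[0] raises IndexError in Python; excluded by Pre_
  | w0 :: rest =>
    let result := rest.foldl (fun res elem =>
      if pvFlagA res then res ++ [pvCapWord elem]
      else if elem = ['i'] then res ++ [pvCapWord elem]
      else res ++ [elem]) [pvCapWord w0]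
    String.ofList (PySem.Chars.join [' '] result)

-- ===== PORT B =====
-- the while-loop of Source B as recursion over the remaining characters of text:
-- state (prev, cap, start) = (last non-space char seen, capitalize current word?, at word start?).
-- The lookahead text[i+1] / text[i+2] is the head / second element of the remaining
-- list cs; head? = none stands for Python's IndexError, which is unreachable because
-- ' '.join(words) never ends in a space.
def pvRunB (prev : Char) (cap start : Bool) (text : List Char) : List Char :=
  match text with
  | [] => []
  | c :: cs =>
    if c = ' ' then
      let next_is_i := cs.head? = some 'i' ∧ (cs.tail = [] ∨ cs.tail.head? = some ' ')
      ' ' :: pvRunB prev (pvSpecial.contains prev || decide next_is_i) true cs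
    else if cap then
      (if start then PySem.Chars.upperChar c else PySem.Chars.lowerChar c) ::
        pvRunB c cap false cs
    else
      c :: pvRunB c cap false cs

def capitalize_it_alt (string : String) : String :=
  let text := PySem.Chars.join [' '] (PySem.Chars.split₀ string.toList)
  -- Python's initial prev = '' is only consulted if text starts with a space,
  -- which join's output never does; ' ' is an arbitrary initial value.
  String.ofList (pvRunB ' ' true true text)

-- ===== PRECONDITION & SPEC =====
-- A raises IndexError (result_list[0]) when the string has no words; nothing else is excluded.
def Pre_capitalize_it (string : String) : Prop :=
  PySem.Chars.split₀ string.toList ≠ []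
instance (string : String) : Decidable (Pre_capitalize_it string) := by
  unfold Pre_capitalize_it; infer_instance

def pvWitness_capitalize_it : String := "hello. world i am here"

def Spec_capitalize_it (string : String) (out : String) : Prop := out = capitalize_it_alt string
instance (string : String) (out : String) : Decidable (Spec_capitalize_it string out) := by unfold Spec_capitalize_it; infer_instance

-- ===== CLAIM (what is proved, stated in full; the proofs are below) =====
def Claim_equal_capitalize_it : Prop := ∀ (string : String), Dom_capitalize_it string → Pre_capitalize_it string → Spec_capitalize_it string (capitalize_it string)

-- ===== LEMMAS AND PROOFS =====

-- upper-/lower-casing a character does not change whether it is one of '.', ',', '!', '?'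
theorem pvContains_upperChar (c : Char) :
    pvSpecial.contains (PySem.Chars.upperChar c) = pvSpecial.contains c := by
  unfold PySem.Chars.upperChar
  split_ifs with h
  · simp only [PySem.Chars.islower, Bool.and_eq_true, decide_eq_true_eq] at h
    have h1 : 97 ≤ c.toNat := h.1
    have h2 : c.toNat ≤ 122 := h.2
    have hv : (Char.ofNat (c.toNat - 32)).toNat = c.toNat - 32 := by
      rw [Char.toNat_ofNat, if_pos]
      exact Or.inl (by omega)
    have hL : ∀ d : Char, 64 ≤ d.toNat → pvSpecial.contains d = false := by
      intro d hd1
      simp only [pvSpecial, List.contains_cons, List.contains_nil,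
        Bool.or_eq_false_iff, beq_eq_false_iff_ne, ne_eq]
      refine ⟨?_, ?_, ?_, ⟨?_, trivial⟩⟩ <;>
      · intro he
        have := congrArg Char.toNat he
        simp at this
        omega
    rw [hL _ (by rw [hv]; omega), hL c (by omega)]
  · rfl

theorem pvContains_lowerChar (c : Char) :
    pvSpecial.contains (PySem.Chars.lowerChar c) = pvSpecial.contains c := by
  unfold PySem.Chars.lowerChar
  split_ifs with h
  · simp only [PySem.Chars.isupper, Bool.and_eq_true, decide_eq_true_eq] at h
    have h1 : 65 ≤ c.toNat := h.1
    have h2 : c.toNat ≤ 90 := h.2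
    have hv : (Char.ofNat (c.toNat + 32)).toNat = c.toNat + 32 := by
      rw [Char.toNat_ofNat, if_pos]
      exact Or.inl (by omega)
    have hL : ∀ d : Char, 64 ≤ d.toNat → pvSpecial.contains d = false := by
      intro d hd1
      simp only [pvSpecial, List.contains_cons, List.contains_nil,
        Bool.or_eq_false_iff, beq_eq_false_iff_ne, ne_eq]
      refine ⟨?_, ?_, ?_, ⟨?_, trivial⟩⟩ <;>
      · intro he
        have := congrArg Char.toNat he
        simp at this
        omega
    rw [hL _ (by rw [hv]; omega), hL c (by omega)]
  · rfl

-- capitalize() does not change whether a word ends in a special character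
theorem pvLastSpecial_capWord (w : List Char) :
    pvLastSpecial (pvCapWord w) = pvLastSpecial w := by
  cases w with
  | nil => rfl
  | cons c cs =>
    rcases List.eq_nil_or_concat cs with rfl | ⟨ds, d, rfl⟩
    · exact pvContains_upperChar c
    · have e1 : ((ds ++ [d]).map PySem.Chars.lowerChar).getLast?
          = some (PySem.Chars.lowerChar d) := by
        simp
      simp only [List.concat_eq_append]
      show pvLastSpecial (PySem.Chars.upperChar c :: (ds ++ [d]).map PySem.Chars.lowerChar)
          = pvLastSpecial (c :: (ds ++ [d]))
      have e1' : (PySem.Chars.upperChar c ::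
          (ds ++ [d]).map PySem.Chars.lowerChar).getLast? = some (PySem.Chars.lowerChar d) := by
        rw [List.getLast?_cons, e1]; rfl
      have e2 : (c :: (ds ++ [d])).getLast? = some d := by
        rw [List.getLast?_cons]; simp
      simp only [pvLastSpecial, e1', e2]
      exact pvContains_lowerChar d

-- A's accumulator loop equals a stateless pairwise map over (prev word, word),
-- given the invariant that the accumulator is nonempty and its last word's flag
-- equals the previous input word's flag
theorem pvLoop_eq (rest acc : List (List Char)) (prev : List Char)
    (hacc : acc ≠ []) (h : pvFlagA acc = pvLastSpecial prev) :
    rest.foldl (fun res elem =>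
      if pvFlagA res then res ++ [pvCapWord elem]
      else if elem = ['i'] then res ++ [pvCapWord elem]
      else res ++ [elem]) acc
    = acc ++ (List.zip (prev :: rest) rest).map (fun pc =>
        if pvLastSpecial pc.1 || pc.2 = ['i'] then pvCapWord pc.2 else pc.2) := by
  induction rest generalizing acc prev with
  | nil => simp
  | cons e rs ih =>
    have hstep : (if pvFlagA acc then acc ++ [pvCapWord e]
        else if e = ['i'] then acc ++ [pvCapWord e] else acc ++ [e])
        = acc ++ [if pvLastSpecial prev || e = ['i'] then pvCapWord e else e] := by
      rw [h]
      by_cases h1 : pvLastSpecial prev = true <;> by_cases h2 : e = ['i'] <;>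
        simp [h1, h2]
    have hflag : pvFlagA (acc ++ [if pvLastSpecial prev || e = ['i'] then pvCapWord e else e])
        = pvLastSpecial e := by
      simp only [pvFlagA, List.getLast?_append, List.getLast?_cons, List.getLast?_nil]
      split_ifs <;> simp [pvLastSpecial_capWord]
    rw [List.foldl_cons, hstep,
      ih (acc ++ [if pvLastSpecial prev || e = ['i'] then pvCapWord e else e]) e
        (by simp) hflag]
    simp

-- a «good» word: what split() yields — nonempty, no whitespace
-- a «good» word: what split() yields — nonempty, no whitespace
def pvGood (w : List Char) : Prop := w ≠ [] ∧ ∀ c ∈ w, PySem.Chars.isspace c = false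

-- every word of split() is nonempty and whitespace-free
theorem pvSplit₀_go_good (s : List Char) : ∀ (cur : List Char) (acc : List (List Char)),
    (∀ c ∈ cur, PySem.Chars.isspace c = false) → (∀ w ∈ acc, pvGood w) →
    ∀ w ∈ PySem.Chars.split₀.go s cur acc, pvGood w := by
  induction s with
  | nil =>
    intro cur acc hcur hacc w hw
    simp only [PySem.Chars.split₀.go] at hw
    split at hw
    · exact hacc w (by simpa using hw)
    · rw [List.mem_reverse, List.mem_cons] at hw
      rcases hw with hw | hw
      · subst hw
        rename_i hne
        simp only [List.isEmpty_iff] at hne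
        exact ⟨by simpa using hne, fun d hd => hcur d (List.mem_reverse.mp hd)⟩
      · exact hacc w hw
  | cons c rest ih =>
    intro cur acc hcur hacc w hw
    simp only [PySem.Chars.split₀.go] at hw
    split at hw
    · split at hw
      · exact ih [] acc (by simp) hacc w hw
      · rename_i hne
        simp only [List.isEmpty_iff] at hne
        refine ih [] (cur.reverse :: acc) (by simp) ?_ w hw
        intro v hv
        rw [List.mem_cons] at hv
        rcases hv with rfl | hv
        · exact ⟨by simpa using hne, fun d hd => hcur d (List.mem_reverse.mp hd)⟩
        · exact hacc v hv
    · rename_i hsp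
      refine ih (c :: cur) acc ?_ hacc w hw
      intro d hd
      rw [List.mem_cons] at hd
      rcases hd with rfl | hd
      · simpa using hsp
      · exact hcur d hd

theorem pvSplit₀_good (l : List Char) : ∀ w ∈ PySem.Chars.split₀ l, pvGood w :=
  pvSplit₀_go_good l [] [] (by simp) (by simp)

theorem pvGood_no_space {w : List Char} (h : pvGood w) : ∀ c ∈ w, c ≠ ' ' := by
  rintro c hc rfl
  have := h.2 _ hc
  simp [PySem.Chars.isspace] at this

-- join [' '] written as append/flatMap
theorem pvJoin_cons (v : List Char) (vs : List (List Char)) :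
    PySem.Chars.join [' '] (v :: vs) = v ++ vs.flatMap (fun w => ' ' :: w) := by
  induction vs generalizing v with
  | nil => simp [PySem.Chars.join, List.intercalate]
  | cons w ws ih =>
    have h : [' '].intercalate (v :: w :: ws) = v ++ [' '] ++ [' '].intercalate (w :: ws) := by
      simp [List.intercalate, List.intersperse]
    simp only [PySem.Chars.join] at *
    rw [h, ih w]
    simp

-- running the machine through the non-first characters of a word
theorem pvRunB_mid (cs : List Char) (h : ∀ c ∈ cs, c ≠ ' ') (prev : Char) (cap : Bool)
    (rest : List Char) :
    pvRunB prev cap false (cs ++ rest)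
      = (if cap then cs.map PySem.Chars.lowerChar else cs)
        ++ pvRunB (cs.getLastD prev) cap false rest := by
  induction cs generalizing prev with
  | nil => simp
  | cons c cs ih =>
    have hc : c ≠ ' ' := h c (by simp)
    rw [List.cons_append, pvRunB]
    simp only [if_neg hc]
    rw [ih (fun d hd => h d (by simp [hd])) c, List.getLastD_cons]
    cases cap <;> simp

-- running the machine through a whole word
theorem pvRunB_word (w : List Char) (hw : w ≠ []) (h : ∀ c ∈ w, c ≠ ' ')
    (prev : Char) (cap : Bool) (rest : List Char) :
    pvRunB prev cap true (w ++ rest)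
      = (if cap then pvCapWord w else w) ++ pvRunB (w.getLastD prev) cap false rest := by
  cases w with
  | nil => exact absurd rfl hw
  | cons c cs =>
    have hc : c ≠ ' ' := h c (by simp)
    rw [List.cons_append, pvRunB]
    simp only [if_neg hc]
    rw [pvRunB_mid cs (fun d hd => h d (by simp [hd])) c, List.getLastD_cons]
    cases cap <;> simp [pvCapWord]

-- the lookahead after a space detects exactly the standalone word 'i'
theorem pvLookahead (w : List Char) (hw : w ≠ []) (h : ∀ c ∈ w, c ≠ ' ')
    (rest : List Char) (hr : rest = [] ∨ rest.head? = some ' ') :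
    ((w ++ rest).head? = some 'i' ∧ ((w ++ rest).tail = [] ∨ (w ++ rest).tail.head? = some ' '))
      ↔ w = ['i'] := by
  cases w with
  | nil => exact absurd rfl hw
  | cons c cs =>
    simp only [List.cons_append, List.head?_cons, Option.some.injEq, List.tail_cons]
    constructor
    · rintro ⟨rfl, h2⟩
      cases cs with
      | nil => rfl
      | cons d ds =>
        have hd : d ≠ ' ' := h d (by simp)
        simp at h2
        exact absurd h2 hd
    · rintro he
      injection he with h1 h2
      subst h1; subst h2
      simp only [List.nil_append, true_and]
      rcases hr with rfl | hh
      · exact Or.inl rfl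
      · cases rest with
        | nil => exact Or.inl rfl
        | cons r rs => simp at hh; simp [hh]

-- the per-word spec of the machine's tail loop
def pvSpecTail (prev : Char) (ws : List (List Char)) : List (List Char) :=
  match ws with
  | [] => []
  | w :: ws' =>
    (if pvSpecial.contains prev || w = ['i'] then pvCapWord w else w)
      :: pvSpecTail (w.getLastD prev) ws'

-- the machine on the remaining «space-word» blocks computes pvSpecTail
theorem pvRunB_tail (ws : List (List Char)) (hws : ∀ w ∈ ws, pvGood w)
    (prev : Char) (cap start : Bool) :
    pvRunB prev cap start (ws.flatMap (fun w => ' ' :: w))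
      = (pvSpecTail prev ws).flatMap (fun w => ' ' :: w) := by
  induction ws generalizing prev cap start with
  | nil => simp [pvRunB, pvSpecTail]
  | cons w ws ih =>
    have hg := hws w (by simp)
    have hns := pvGood_no_space hg
    have hrest : ws.flatMap (fun w => ' ' :: w) = [] ∨
        (ws.flatMap (fun w => ' ' :: w)).head? = some ' ' := by
      cases ws with
      | nil => exact Or.inl rfl
      | cons v vs => exact Or.inr (by simp)
    rw [List.flatMap_cons, List.cons_append]
    rw [pvRunB]
    simp only [if_pos rfl]
    have hla : decide ((w ++ ws.flatMap (fun w => ' ' :: w)).head? = some 'i' ∧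
        ((w ++ ws.flatMap (fun w => ' ' :: w)).tail = [] ∨
         (w ++ ws.flatMap (fun w => ' ' :: w)).tail.head? = some ' '))
        = decide (w = ['i']) := by
      simp only [decide_eq_decide]
      exact pvLookahead w hg.1 hns _ hrest
    rw [hla]
    rw [pvRunB_word w hg.1 hns]
    rw [ih (fun v hv => hws v (by simp [hv]))]
    by_cases hi : w = ['i'] <;>
      by_cases hp : (pvSpecial.contains prev) = true <;>
        simp [pvSpecTail, hi, hp]

-- pvSpecTail is the pairwise zip map, once prev is the previous word's last char
theorem pvSpecTail_eq_zip (ws : List (List Char)) (hws : ∀ w ∈ ws, pvGood w)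
    (pw : List Char) (prev : Char) (h : pw.getLast? = some prev) :
    pvSpecTail prev ws
      = (List.zip (pw :: ws) ws).map (fun pc =>
          if pvLastSpecial pc.1 || pc.2 = ['i'] then pvCapWord pc.2 else pc.2) := by
  induction ws generalizing pw prev with
  | nil => simp [pvSpecTail]
  | cons w ws ih =>
    have hg := hws w (by simp)
    have hlast : w.getLast? = some (w.getLastD prev) := by
      cases w with
      | nil => exact absurd rfl hg.1
      | cons c cs =>
        rw [List.getLastD_eq_getLast?]
        cases hx : (c :: cs).getLast? with
        | none => simp at hx
        | some x => rfl
    rw [List.zip_cons_cons, List.map_cons, pvSpecTail,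
      ih (fun v hv => hws v (by simp [hv])) w _ hlast]
    have hps : pvLastSpecial pw = pvSpecial.contains prev := by
      simp [pvLastSpecial, h]
    simp [hps]

-- ===== VERDICT (by name: the statement is the Claim_ definition above) =====
theorem capitalize_it_spec : Claim_equal_capitalize_it := by
  intro s _ hpre
  unfold Spec_capitalize_it capitalize_it capitalize_it_alt
  cases hws : PySem.Chars.split₀ s.toList with
  | nil => exact absurd hws hpre
  | cons w0 rest =>
    have hgood := pvSplit₀_good s.toList
    rw [hws] at hgood
    have hg0 := hgood w0 (by simp)
    have hgr : ∀ w ∈ rest, pvGood w := fun w hw => hgood w (by simp [hw])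
    have hlast : w0.getLast? = some (w0.getLastD ' ') := by
      cases w0 with
      | nil => exact absurd rfl hg0.1
      | cons c cs =>
        rw [List.getLastD_eq_getLast?]
        cases hx : (c :: cs).getLast? with
        | none => simp at hx
        | some x => rfl
    simp only []
    rw [pvLoop_eq rest [pvCapWord w0] w0 (by simp)
      (by simp [pvFlagA, pvLastSpecial_capWord])]
    rw [pvJoin_cons w0 rest, pvRunB_word w0 hg0.1 (pvGood_no_space hg0),
      pvRunB_tail rest hgr, pvSpecTail_eq_zip rest hgr w0 _ hlast]
    rw [show [pvCapWord w0] ++ (List.zip (w0 :: rest) rest).map (fun pc =>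
        if pvLastSpecial pc.1 || pc.2 = ['i'] then pvCapWord pc.2 else pc.2)
      = pvCapWord w0 :: (List.zip (w0 :: rest) rest).map (fun pc =>
        if pvLastSpecial pc.1 || pc.2 = ['i'] then pvCapWord pc.2 else pc.2) from rfl]
    rw [pvJoin_cons]
    simp
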